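-- pv_equiv track=rewrite | github.com/Vorschlag-bit/Algorithm-Baekjoon- | 프로그래머스/2/389479. 서버 증설 횟수/서버 증설 횟수.py | solution
-- ===== SOURCE A (Python) =====
-- from collections import deque
--
-- def solution(players, m, k):
--     ans = 0
--     # 하루동안 최소 몇 번 증설해야하는지
--     # players[i] = i~i시 사이의 이용자 수
--     # m명 = 1대 서버 감당 가능
--     # 한 번 증설한 서버는 k 시간 동안 운영
--     # stack으로 stack[0]에 가장 빨리 증설한 서버 종료 시각 저장
--     # 매번 시각과 종료 시각을 비교하기
--     stack = deque()
--     for i,p in enumerate(players):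
--         # 플레이하는 사람 없으면 pass
--         if p == 0: continue
--         st = i
--         et = i+1
--         while stack and stack[0] < et:
--             stack.popleft()
--         server = len(stack)
--         # 현재 감당 가능 인원보다 더 많은 이가 플레이할 경우
--         if server * m < p:
--             total = p // m
--             total -= server
--             for _ in range(total):
--                 stack.append(st+k)
--             ans += total
--     return ans
-- ===== SOURCE B (Python) =====
-- def solution(players, m, k):
--     # Prefix-sum formulation: additions per hour are recorded in a prefix-sum
--     # array, and the number of servers still running at hour i is read off as
--     # pref[i] - pref[lo] for the window of start hours whose servers have not
--     # yet expired (start j is alive at hour i iff j + k >= i + 1, i.e. j >= i+1-k).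
--     ans = 0
--     pref = [0]  # pref[j] = total servers added during hours 0..j-1
--     for i, p in enumerate(players):
--         lo = i + 1 - k
--         if lo < 0:
--             lo = 0
--         if lo > i:
--             lo = i
--         active = pref[i] - pref[lo]
--         add = 0
--         if p != 0 and active * m < p:
--             delta = p // m - active
--             ans += delta
--             if delta > 0:
--                 add = delta
--         pref.append(pref[i] + add)
--     return ans
-- ===== Notes on version B (the rewrite author's own statement) =====
-- stated objective: alternative
-- what changed: B drops A's deque of per-server expiry times entirely: it records additions in a prefix-sum array indexed by hour and reads the number of still-running servers as pref[i]-pref[max(0,i+1-k)] by pure index arithmetic, instead of A's expiry-popping sweep with one deque entry per server unit.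
import Mathlib
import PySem

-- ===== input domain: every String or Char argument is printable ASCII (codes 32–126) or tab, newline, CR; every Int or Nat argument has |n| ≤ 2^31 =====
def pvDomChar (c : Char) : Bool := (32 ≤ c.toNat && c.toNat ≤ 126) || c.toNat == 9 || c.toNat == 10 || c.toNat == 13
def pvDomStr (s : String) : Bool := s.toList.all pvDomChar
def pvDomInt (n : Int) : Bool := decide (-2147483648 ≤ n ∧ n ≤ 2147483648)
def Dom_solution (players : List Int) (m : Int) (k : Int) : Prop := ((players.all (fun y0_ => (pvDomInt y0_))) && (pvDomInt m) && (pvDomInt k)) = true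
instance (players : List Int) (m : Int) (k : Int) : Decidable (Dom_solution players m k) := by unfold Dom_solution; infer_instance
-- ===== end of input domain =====

-- B replaces A's deque of per-server expiry times by a prefix-sum array over hours,
-- reading the active-server count by index arithmetic (objective: alternative).

-- ===== PORT A =====
-- 'while stack and stack[0] < et: stack.popleft()'
def popExpired (stack : List Int) (et : Int) : List Int :=
  match stack with
  | [] => []
  | x :: xs => if x < et then popExpired xs et else x :: xs

-- one iteration of A's 'for i,p in enumerate(players)' loop; state = (ans, stack)
def stepA (m k : Int) (s : Int × List Int) (ip : Int × Int) : Int × List Int :=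
  if ip.2 == 0 then s
  else
    let st := ip.1
    let et := ip.1 + 1
    let stack := popExpired s.2 et
    let server : Int := stack.length
    if server * m < ip.2 then
      let total := PySem.Int.floordiv ip.2 m - server
      -- 'for _ in range(total): stack.append(st+k)'
      let stack := (PySem.List.pyRange 0 total 1).foldl (fun st2 _ => st2 ++ [st + k]) stack
      (s.1 + total, stack)
    else (s.1, stack)

def solution (players : List Int) (m : Int) (k : Int) : Int :=
  ((PySem.List.enumerate players).foldl (stepA m k) (0, [])).1

-- ===== PORT B =====
-- one iteration of B's loop; state = (ans, pref).  pref[i] and pref[lo] are always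
-- in range (pref has length i+1 at hour i), so the pyGet? lookups never miss.
def stepB (m k : Int) (s : Int × List Int) (ip : Int × Int) : Int × List Int :=
  let lo0 := ip.1 + 1 - k
  let lo1 := if lo0 < 0 then 0 else lo0
  let lo := if lo1 > ip.1 then ip.1 else lo1
  let prefI := (PySem.List.pyGet? s.2 ip.1).getD 0
  let active := prefI - (PySem.List.pyGet? s.2 lo).getD 0
  let r :=
    if ip.2 ≠ 0 ∧ active * m < ip.2 then
      let delta := PySem.Int.floordiv ip.2 m - active
      (s.1 + delta, if delta > 0 then delta else 0)
    else (s.1, (0 : Int))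
  (r.1, s.2 ++ [prefI + r.2])

def solution_alt (players : List Int) (m : Int) (k : Int) : Int :=
  ((PySem.List.enumerate players).foldl (stepB m k) (0, [0])).1

-- ===== PRECONDITION & SPEC =====
-- m = 0 makes 'p // m' raise ZeroDivisionError in Python (both A and B); nothing else raises.
def Pre_solution (players : List Int) (m : Int) (k : Int) : Prop := m ≠ 0
instance (players : List Int) (m : Int) (k : Int) : Decidable (Pre_solution players m k) := by unfold Pre_solution; infer_instance
def pvWitness_solution : List Int × Int × Int := ([3, 0, 5], 2, 2)

def Spec_solution (players : List Int) (m : Int) (k : Int) (out : Int) : Prop := out = solution_alt players m k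
instance (players : List Int) (m : Int) (k : Int) (out : Int) : Decidable (Spec_solution players m k out) := by unfold Spec_solution; infer_instance

-- ===== CLAIM (what is proved, stated in full; the proofs are below) =====
def Claim_equal_solution : Prop := ∀ (players : List Int) (m : Int) (k : Int), Dom_solution players m k → Pre_solution players m k → Spec_solution players m k (solution players m k)

-- ===== LEMMAS AND PROOFS =====

-- Ghost data for the coupling: 'add j' = servers added at hour j; 'expFrom j k add'
-- is A's fully expanded expiry list (one entry per server unit, in hour order).
def expFrom (j k : Int) (add : List Nat) : List Int :=
  match add with
  | [] => []
  | a :: rest => List.replicate a (j + k) ++ expFrom (j + 1) k rest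

theorem popExpired_eq_dropWhile (L : List Int) (et : Int) :
    popExpired L et = L.dropWhile (fun e => decide (e < et)) := by
  induction L with
  | nil => rfl
  | cons x xs ih =>
    by_cases h : x < et <;> simp [popExpired, List.dropWhile_cons, h, ih]

theorem dropWhile_lt_lt (a b : Int) (h : a ≤ b) (L : List Int) :
    (L.dropWhile (fun e => decide (e < a))).dropWhile (fun e => decide (e < b))
      = L.dropWhile (fun e => decide (e < b)) := by
  induction L with
  | nil => rfl
  | cons x xs ih =>
    by_cases hx : x < a
    · have hx' : x < b := lt_of_lt_of_le hx h
      simp [List.dropWhile_cons, hx, hx', ih]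
    · simp [List.dropWhile_cons, hx]

theorem dropWhile_append_of_false (p : Int → Bool) (L R : List Int)
    (hR : ∀ e ∈ R, p e = false) :
    (L ++ R).dropWhile p = L.dropWhile p ++ R := by
  induction L with
  | nil =>
    simp only [List.nil_append, List.dropWhile_nil]
    cases R with
    | nil => rfl
    | cons r rs => simp [List.dropWhile_cons, hR r (by simp)]
  | cons x xs ih =>
    by_cases hx : p x = true
    · simp [List.dropWhile_cons, hx, ih]
    · rw [Bool.not_eq_true] at hx
      simp [List.dropWhile_cons, hx]

theorem dropWhile_append_of_true (p : Int → Bool) (L R : List Int)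
    (hL : ∀ e ∈ L, p e = true) :
    (L ++ R).dropWhile p = R.dropWhile p := by
  induction L with
  | nil => simp
  | cons x xs ih =>
    simp [List.dropWhile_cons, hL x (by simp), ih (fun e he => hL e (by simp [he]))]

theorem dropWhile_eq_nil_of_forall (p : Int → Bool) (L : List Int)
    (h : ∀ e ∈ L, p e = true) : L.dropWhile p = [] := by
  induction L with
  | nil => rfl
  | cons x xs ih =>
    simp [List.dropWhile_cons, h x (by simp), ih (fun e he => h e (by simp [he]))]

theorem dropWhile_eq_self_of_forall (p : Int → Bool) (L : List Int)
    (h : ∀ e ∈ L, p e = false) : L.dropWhile p = L := by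
  cases L with
  | nil => rfl
  | cons x xs => simp [List.dropWhile_cons, h x (by simp)]

theorem mem_expFrom (k : Int) (add : List Nat) : ∀ (j : Int), ∀ e ∈ expFrom j k add,
    j + k ≤ e ∧ e < j + (add.length : Int) + k := by
  induction add with
  | nil => intro j e he; simp [expFrom] at he
  | cons a rest ih =>
    intro j e he
    simp only [expFrom, List.mem_append, List.mem_replicate] at he
    rcases he with ⟨_, rfl⟩ | he
    · have : (0 : Int) ≤ (rest.length : Int) := Int.natCast_nonneg _
      constructor
      · exact le_refl _
      · simp only [List.length_cons]
        push_cast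
        omega
    · obtain ⟨h1, h2⟩ := ih (j + 1) e he
      constructor
      · omega
      · simp only [List.length_cons]
        push_cast
        push_cast at h2
        omega

theorem expFrom_append (k : Int) (add : List Nat) : ∀ (j : Int) (a : Nat),
    expFrom j k (add ++ [a])
      = expFrom j k add ++ List.replicate a (j + (add.length : Int) + k) := by
  induction add with
  | nil => intro j a; simp [expFrom]
  | cons b rest ih =>
    intro j a
    simp only [List.cons_append, expFrom, ih (j + 1) a, List.append_assoc]
    congr 3
    simp only [List.length_cons]
    push_cast
    ring

theorem length_expFrom (k : Int) (add : List Nat) : ∀ (j : Int),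
    (expFrom j k add).length = add.sum := by
  induction add with
  | nil => intro j; simp [expFrom]
  | cons a rest ih => intro j; simp [expFrom, ih (j + 1)]

theorem length_dropWhile_expFrom (k thr : Int) (add : List Nat) : ∀ (j : Int),
    ((expFrom j k add).dropWhile (fun e => decide (e < thr))).length
      = (add.drop (thr - k - j).toNat).sum := by
  induction add with
  | nil => intro j; simp [expFrom]
  | cons a rest ih =>
    intro j
    by_cases h : j + k < thr
    · have hrep : ∀ e ∈ List.replicate a (j + k), (decide (e < thr)) = true := by
        intro e he
        rw [List.eq_of_mem_replicate he]
        simp [h]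
      rw [show expFrom j k (a :: rest)
            = List.replicate a (j + k) ++ expFrom (j + 1) k rest from rfl]
      rw [dropWhile_append_of_true _ _ _ hrep, ih (j + 1)]
      have hn : (thr - k - j).toNat = (thr - k - (j + 1)).toNat + 1 := by omega
      rw [hn]
      rfl
    · have hfail : ∀ e ∈ expFrom j k (a :: rest), (decide (e < thr)) = false := by
        intro e he
        have := (mem_expFrom k (a :: rest) j e he).1
        simp only [decide_eq_false_iff_not]
        omega
      rw [dropWhile_eq_self_of_forall _ _ hfail, length_expFrom]
      have hz : (thr - k - j).toNat = 0 := by omega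
      simp [hz]

theorem getD_append_lt (l l' : List Int) (n : Nat) (d : Int) (h : n < l.length) :
    (l ++ l').getD n d = l.getD n d := by
  simp [List.getD_eq_getElem?_getD, List.getElem?_append_left h]

theorem getD_snoc_self (l : List Int) (x d : Int) :
    (l ++ [x]).getD l.length d = x := by
  simp [List.getD_eq_getElem?_getD, List.getElem?_append_right (le_refl l.length)]

theorem sum_take_snoc (add : List Nat) (c j : Nat) (h : j ≤ add.length) :
    ((add ++ [c]).take j).sum = (add.take j).sum := by
  rw [List.take_append_of_le_length h]

-- the two pyGet? lookups of B, evaluated against the prefix-sum invariant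
theorem active_val (add : List Nat) (pref : List Int) (lo : Int)
    (hlen : pref.length = add.length + 1)
    (hj : ∀ j : Nat, j ≤ add.length → pref.getD j 0 = ((add.take j).sum : Int))
    (h0 : 0 ≤ lo) (h1 : lo ≤ (add.length : Int)) :
    (PySem.List.pyGet? pref ((add.length : Nat) : Int)).getD 0
      - (PySem.List.pyGet? pref lo).getD 0
      = ((add.drop lo.toNat).sum : Int) := by
  have hA : (PySem.List.pyGet? pref ((add.length : Nat) : Int)).getD 0 = (add.sum : Int) := by
    rw [PySem.List.pyGet?_natCast, ← List.getD_eq_getElem?_getD,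
      hj add.length le_rfl, List.take_length]
  have hB : (PySem.List.pyGet? pref lo).getD 0 = ((add.take lo.toNat).sum : Int) := by
    rw [PySem.List.pyGet?_of_nonneg _ h0, ← List.getD_eq_getElem?_getD]
    exact hj lo.toNat (by omega)
  have hs : (add.take lo.toNat).sum + (add.drop lo.toNat).sum = add.sum :=
    List.sum_take_add_sum_drop add lo.toNat
  rw [hA, hB]
  omega

-- dropped-prefix sums agree once the drop index reaches the end of the list
theorem sum_drop_of_ge (add : List Nat) (d e : Nat) (hd : add.length ≤ d)
    (he : add.length ≤ e) : (add.drop d).sum = (add.drop e).sum := by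
  rw [List.drop_eq_nil_of_le hd, List.drop_eq_nil_of_le he]

-- B's two clamping ifs, as one expression (proof-side abbreviation of stepB's lets)
def loClamp (i k : Int) : Int :=
  if (if i + 1 - k < 0 then 0 else i + 1 - k) > i then i
  else (if i + 1 - k < 0 then 0 else i + 1 - k)

theorem foldl_append_replicate {a : Type} (v : a) (l : List Int) (init : List a) :
    l.foldl (fun s2 _ => s2 ++ [v]) init = init ++ List.replicate l.length v := by
  induction l generalizing init with
  | nil => simp
  | cons x xs ih =>
    rw [List.foldl_cons, ih, List.append_assoc]
    simp [List.replicate_succ]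

theorem stepA_eval (m k ansA : Int) (stack : List Int) (i p : Int) (hp : p ≠ 0) :
    stepA m k (ansA, stack) (i, p)
      = (if ((popExpired stack (i + 1)).length : Int) * m < p then
           (ansA + (PySem.Int.floordiv p m - ((popExpired stack (i + 1)).length : Int)),
            popExpired stack (i + 1)
              ++ List.replicate
                  (PySem.Int.floordiv p m - ((popExpired stack (i + 1)).length : Int)).toNat
                  (i + k))
         else (ansA, popExpired stack (i + 1))) := by
  simp only [stepA]
  rw [if_neg (by simpa using hp)]
  split_ifs with hcond
  · rw [foldl_append_replicate, PySem.List.length_pyRange_one]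
    congr 3
    omega
  · rfl

theorem stepB_eval (m k ansB : Int) (pref : List Int) (i p : Int) (hp : p ≠ 0) :
    stepB m k (ansB, pref) (i, p)
      = (if ((PySem.List.pyGet? pref i).getD 0
              - (PySem.List.pyGet? pref (loClamp i k)).getD 0) * m < p then
           (ansB + (PySem.Int.floordiv p m
              - ((PySem.List.pyGet? pref i).getD 0
                  - (PySem.List.pyGet? pref (loClamp i k)).getD 0)),
            pref ++ [(PySem.List.pyGet? pref i).getD 0
              + (if PySem.Int.floordiv p m
                    - ((PySem.List.pyGet? pref i).getD 0
                        - (PySem.List.pyGet? pref (loClamp i k)).getD 0) > 0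
                 then PySem.Int.floordiv p m
                    - ((PySem.List.pyGet? pref i).getD 0
                        - (PySem.List.pyGet? pref (loClamp i k)).getD 0)
                 else 0)])
         else (ansB, pref ++ [(PySem.List.pyGet? pref i).getD 0 + 0])) := by
  simp only [stepB, loClamp, hp, ne_eq, not_false_iff, true_and]
  split_ifs <;> rfl

-- one simulated step: A's (ans, stack) and B's (ans, pref) stay coupled
theorem step_sim (m k : Int) (add : List Nat) (p ansA ansB t : Int)
    (stack pref : List Int)
    (ht : t ≤ (add.length : Int))
    (hstack : stack = (expFrom 0 k add).dropWhile (fun e => decide (e < t)))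
    (hlen : pref.length = add.length + 1)
    (hj : ∀ j : Nat, j ≤ add.length → pref.getD j 0 = ((add.take j).sum : Int))
    (hans : ansA = ansB) :
    ∃ (add' : List Nat) (t' : Int),
      add'.length = add.length + 1 ∧
      t' ≤ (add'.length : Int) ∧
      (stepA m k (ansA, stack) (((add.length : Nat) : Int), p)).2
        = (expFrom 0 k add').dropWhile (fun e => decide (e < t')) ∧
      (stepB m k (ansB, pref) (((add.length : Nat) : Int), p)).2.length = add'.length + 1 ∧
      (∀ j : Nat, j ≤ add'.length →
        (stepB m k (ansB, pref) (((add.length : Nat) : Int), p)).2.getD j 0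
          = ((add'.take j).sum : Int)) ∧
      (stepA m k (ansA, stack) (((add.length : Nat) : Int), p)).1
        = (stepB m k (ansB, pref) (((add.length : Nat) : Int), p)).1 := by
  subst hans
  by_cases hp : p = 0
  · -- Python A: 'continue'; Python B: condition is false, appends pref[i] + 0
    subst hp
    refine ⟨add ++ [0], t, by simp, by simp only [List.length_append, List.length_singleton]; push_cast; omega, ?_, by simp [stepB, hlen], ?_, ?_⟩
    · rw [show (stepA m k (ansA, stack) (((add.length : Nat) : Int), 0)).2 = stack from by
        simp [stepA]]
      rw [expFrom_append]
      simp [hstack]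
    · intro j hjle
      simp only [stepB]
      simp only [not_true_eq_false, false_and, if_false, ne_eq]
      simp only [List.length_append, List.length_singleton] at hjle
      by_cases hsmall : j ≤ add.length
      · rw [getD_append_lt _ _ _ _ (by omega), hj j hsmall, sum_take_snoc _ _ _ hsmall]
      · have hje : j = add.length + 1 := by omega
        subst hje
        rw [show add.length + 1 = pref.length from by omega, getD_snoc_self]
        have hPI : (PySem.List.pyGet? pref ((add.length : Nat) : Int)).getD 0
            = (add.sum : Int) := by
          rw [PySem.List.pyGet?_natCast, ← List.getD_eq_getElem?_getD,
            hj add.length le_rfl, List.take_length]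
        rw [hPI, List.take_of_length_le (by simp [hlen])]
        simp
    · simp [stepA, stepB]
  · -- Python: p != 0; both sides consult the same active-server count
    have hi0 : (0 : Int) ≤ ((add.length : Nat) : Int) := Int.natCast_nonneg _
    rw [stepA_eval m k ansA stack _ p hp, stepB_eval m k ansA pref _ p hp]
    set i : Int := ((add.length : Nat) : Int) with hidef
    set lo : Int := loClamp i k with hlodef
    have hlo_0 : 0 ≤ lo := by rw [hlodef]; unfold loClamp; split_ifs <;> omega
    have hlo_i : lo ≤ i := by rw [hlodef]; unfold loClamp; split_ifs <;> omega
    -- A's stack after popping = dropWhile (< i+1) of the full expiry list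
    have hstack1 : popExpired stack (i + 1)
        = (expFrom 0 k add).dropWhile (fun e => decide (e < i + 1)) := by
      rw [popExpired_eq_dropWhile, hstack, dropWhile_lt_lt t (i + 1) (by omega)]
    -- both counts equal the same dropped-suffix sum
    have hcnt : ((popExpired stack (i + 1)).length : Int) = ((add.drop lo.toNat).sum : Int) := by
      rw [hstack1, length_dropWhile_expFrom (k := k) (thr := i + 1) add 0]
      congr 1
      have h1 : (i + 1 - k - 0) = i + 1 - k := by ring
      rw [h1, hlodef]
      unfold loClamp
      split_ifs with hneg hbig hbig
      · -- i + 1 - k < 0 and 0 > i: impossible (0 ≤ i)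
        omega
      · -- i + 1 - k < 0: lo = 0 and the unclamped index is 0 too
        have hz : (i + 1 - k).toNat = 0 := by omega
        simp [hz]
      · -- lo clipped to i: both drop indices reach the end of add
        refine sum_drop_of_ge add _ _ (by omega) (by omega)
      · rfl
    have hPI : (PySem.List.pyGet? pref i).getD 0 = (add.sum : Int) := by
      rw [hidef, PySem.List.pyGet?_natCast, ← List.getD_eq_getElem?_getD,
        hj add.length le_rfl, List.take_length]
    have hactive : (PySem.List.pyGet? pref i).getD 0 - (PySem.List.pyGet? pref lo).getD 0
        = ((add.drop lo.toNat).sum : Int) :=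
      active_val add pref lo hlen hj hlo_0 hlo_i
    rw [hactive, hcnt, hPI]
    set S : Int := ((add.drop lo.toNat).sum : Int) with hSdef
    set D : Int := PySem.Int.floordiv p m - S with hDdef
    -- the appended prefix-sum entry always adds D.toNat servers (0 if D ≤ 0)
    by_cases hcond : S * m < p
    · rw [if_pos hcond, if_pos hcond]
      refine ⟨add ++ [D.toNat], if 1 ≤ k then i + 1 else i + k, ?_, ?_, ?_, ?_, ?_, rfl⟩
      · simp
      · simp only [List.length_append, List.length_singleton]
        push_cast
        split_ifs <;> omega
      · -- A's new stack is the dropWhile of the extended expiry list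
        simp only
        rw [hstack1, expFrom_append]
        have hrep : List.replicate D.toNat (0 + (add.length : Int) + k)
            = List.replicate D.toNat (i + k) := by
          rw [hidef]; congr 1; ring
        rw [hrep]
        by_cases hk : 1 ≤ k
        · rw [if_pos hk]
          rw [dropWhile_append_of_false _ _ _ (by
            intro e he
            rw [List.eq_of_mem_replicate he]
            simp only [decide_eq_false_iff_not]
            omega)]
        · rw [if_neg hk]
          have hLsmall : ∀ e ∈ expFrom 0 k add, e < i + k := by
            intro e he
            have := (mem_expFrom k add 0 e he).2
            rw [hidef]
            omega
          rw [dropWhile_append_of_false _ _ _ (by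
            intro e he
            rw [List.eq_of_mem_replicate he]
            simp only [decide_eq_false_iff_not]
            omega)]
          rw [dropWhile_eq_nil_of_forall _ _ (by
            intro e he
            have h1 := hLsmall e he
            simp only [decide_eq_true_eq]
            omega)]
          rw [dropWhile_eq_nil_of_forall _ _ (by
            intro e he
            have := hLsmall e he
            simp only [decide_eq_true_eq]
            omega)]
      · simp [hlen]
      · intro j hjle
        simp only [List.length_append, List.length_singleton] at hjle
        by_cases hsmall : j ≤ add.length
        · rw [getD_append_lt _ _ _ _ (by omega), hj j hsmall, sum_take_snoc _ _ _ hsmall]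
        · have hje : j = add.length + 1 := by omega
          subst hje
          rw [show add.length + 1 = pref.length from by omega, getD_snoc_self]
          rw [List.take_of_length_le (by simp [hlen])]
          have : ((if D > 0 then D else 0) : Int) = (D.toNat : Int) := by
            split_ifs with hD <;> omega
          rw [this]
          push_cast
          simp
    · rw [if_neg hcond, if_neg hcond]
      refine ⟨add ++ [0], i + 1, by simp,
        by simp only [List.length_append, List.length_singleton]; push_cast; omega, ?_,
        by simp [hlen], ?_, rfl⟩
      · rw [hstack1, expFrom_append]
        simp
      · intro j hjle
        simp only [List.length_append, List.length_singleton] at hjle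
        by_cases hsmall : j ≤ add.length
        · rw [getD_append_lt _ _ _ _ (by omega), hj j hsmall, sum_take_snoc _ _ _ hsmall]
        · have hje : j = add.length + 1 := by omega
          subst hje
          rw [show add.length + 1 = pref.length from by omega, getD_snoc_self]
          rw [List.take_of_length_le (by simp [hlen])]
          push_cast
          simp

theorem loop_eq (m k : Int) (rest : List Int) : ∀ (add : List Nat) (ansA ansB t : Int)
    (stack pref : List Int),
    t ≤ (add.length : Int) →
    stack = (expFrom 0 k add).dropWhile (fun e => decide (e < t)) →
    pref.length = add.length + 1 →
    (∀ j : Nat, j ≤ add.length → pref.getD j 0 = ((add.take j).sum : Int)) →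
    ansA = ansB →
    ((PySem.List.enumerate rest ((add.length : Nat) : Int)).foldl (stepA m k) (ansA, stack)).1
      = ((PySem.List.enumerate rest ((add.length : Nat) : Int)).foldl (stepB m k) (ansB, pref)).1 := by
  induction rest with
  | nil => intro add ansA ansB t stack pref _ _ _ _ hans; simpa using hans
  | cons p ps ih =>
    intro add ansA ansB t stack pref ht hstack hlen hj hans
    simp only [PySem.List.enumerate_cons, List.foldl_cons]
    obtain ⟨add', t', hlen', ht', hstack', hplen', hpj', hans'⟩ :=
      step_sim m k add p ansA ansB t stack pref ht hstack hlen hj hans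
    have hcast : ((add.length : Nat) : Int) + 1 = ((add'.length : Nat) : Int) := by
      rw [hlen']; push_cast; ring
    rw [hcast]
    have := ih add' (stepA m k (ansA, stack) (((add.length : Nat) : Int), p)).1
      (stepB m k (ansB, pref) (((add.length : Nat) : Int), p)).1 t'
      (stepA m k (ansA, stack) (((add.length : Nat) : Int), p)).2
      (stepB m k (ansB, pref) (((add.length : Nat) : Int), p)).2
      ht' hstack' hplen' hpj' hans'
    simpa using this

-- ===== VERDICT (by name: the statement is the Claim_ definition above) =====
theorem solution_spec : Claim_equal_solution := by
  intro players m k _ _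
  unfold Spec_solution solution solution_alt
  have h := loop_eq m k players [] 0 0 0 [] [0]
    (by simp) (by simp [expFrom]) (by simp)
    (by intro j hj; have hz : j = 0 := Nat.le_zero.mp hj; subst hz; simp) rfl
  simpa using h
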